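-- pv_equiv track=rewrite | github.com/kmike/pymorphy | pymorphy/django_utils.py | _restore_register
-- ===== SOURCE A (Python) =====
-- def _restore_register(morphed_word, word):
--     """ Восстановить регистр слова """
--     if '-' in word:
--         parts = zip(morphed_word.split('-'), word.split('-'))
--         return '-'.join(_restore_register(*p) for p in parts)
--     if word.isupper():
--         return morphed_word.upper()
--     elif word[0].isupper():
--         return morphed_word[0].upper() + morphed_word[1:].lower()
--     else:
--         return morphed_word.lower()
-- ===== SOURCE B (Python) =====
-- def _restore_register(morphed_word, word):
--     """Restore the letter case of a morphed word (non-recursive: one zip/join pass over split parts)."""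
--     def fix(m, w):
--         if w.isupper():
--             return m.upper()
--         if w[0].isupper():
--             return m[0].upper() + m[1:].lower()
--         return m.lower()
--     wparts = word.split('-')
--     mparts = morphed_word.split('-') if len(wparts) > 1 else [morphed_word]
--     return '-'.join(fix(m, w) for m, w in zip(mparts, wparts))
-- ===== Notes on version B (the rewrite author's own statement) =====
-- stated objective: simpler
-- what changed: Replaced A's recursion (hyphen branch re-invoking the whole function on each split pair) by a per-segment helper and one flat zip/join pass over the split parts.
import Mathlib
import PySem

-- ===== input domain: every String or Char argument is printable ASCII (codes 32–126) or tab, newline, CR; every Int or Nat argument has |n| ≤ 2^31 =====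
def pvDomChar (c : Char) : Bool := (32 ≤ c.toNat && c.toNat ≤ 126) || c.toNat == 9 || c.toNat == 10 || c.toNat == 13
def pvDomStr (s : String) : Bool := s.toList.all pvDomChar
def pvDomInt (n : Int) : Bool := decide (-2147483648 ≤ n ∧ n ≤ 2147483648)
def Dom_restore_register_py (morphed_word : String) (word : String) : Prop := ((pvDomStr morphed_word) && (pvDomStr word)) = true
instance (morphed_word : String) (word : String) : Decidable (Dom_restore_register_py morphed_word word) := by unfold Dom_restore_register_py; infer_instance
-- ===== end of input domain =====

-- B replaces A's recursive two-case structure by a single zip/join pass with a per-segment helper (objective: simpler decomposition, same cost).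

-- ===== PORT A =====
-- hand port of Python str.isupper() (used by both versions' per-segment logic); exact on the
-- printable-ASCII domain, where the cased characters are exactly the letters a-z / A-Z
def pyIsUpper (cs : List Char) : Bool :=
  cs.any PySem.Chars.isupper && !cs.any PySem.Chars.islower

-- bridge from PySem's fuel-based splitOn to Mathlib's List.splitOn (proved below the port; the
-- port's termination proof cites splitOn facts by name)
theorem modifyHead_id' (l : List (List Char)) : l.modifyHead (fun a => a) = l := by
  cases l <;> rfl

theorem splitOn_go_eq : ∀ (fuel : Nat) (l cur : List Char) (acc : List (List Char)),
    l.length < fuel →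
    PySem.Chars.splitOn.go ['-'] fuel l cur acc
      = acc.reverse ++ (l.splitOn '-').modifyHead (cur.reverse ++ ·) := by
  intro fuel
  induction fuel with
  | zero => intro l cur acc h; omega
  | succ n ih =>
    intro l cur acc h
    cases l with
    | nil => simp [PySem.Chars.splitOn.go, List.splitOn, List.splitOnP_nil]
    | cons c rest =>
      simp only [PySem.Chars.splitOn.go]
      by_cases hc : c = '-'
      · subst hc
        simp only [List.isPrefixOf, BEq.rfl, Bool.and_self, if_pos]
        rw [ih _ _ _ (by simpa using Nat.lt_of_succ_lt_succ (by simpa using h))]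
        simp [List.splitOn, List.splitOnP_cons, modifyHead_id']
      · rw [if_neg (by simp only [List.isPrefixOf, Bool.and_eq_true, beq_iff_eq]; exact fun hh => hc hh.1.symm)]
        rw [ih _ _ _ (by simpa using Nat.lt_of_succ_lt_succ (by simpa using h))]
        simp only [List.splitOn, List.splitOnP_cons]
        rw [if_neg (by simp [hc])]
        obtain ⟨hd, tl, hx⟩ := List.exists_cons_of_ne_nil (List.splitOnP_ne_nil _ rest)
        rw [hx]
        simp

theorem charsSplitOn_eq (s : List Char) : PySem.Chars.splitOn s ['-'] = s.splitOn '-' := by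
  rw [PySem.Chars.splitOn, splitOn_go_eq (s.length + 1) s [] [] (by omega)]
  simp [modifyHead_id']

theorem not_dash_of_mem_splitOn : ∀ (l p : List Char), p ∈ l.splitOn '-' → '-' ∉ p := by
  intro l
  induction l with
  | nil => intro p hp; simp [List.splitOn, List.splitOnP_nil] at hp; simp [hp]
  | cons c rest ih =>
    intro p hp
    simp only [List.splitOn, List.splitOnP_cons] at hp ih
    by_cases hc : c = '-'
    · rw [if_pos (by simp [hc])] at hp
      rcases List.mem_cons.mp hp with hp | hp
      · simp [hp]
      · exact ih p hp
    · rw [if_neg (by simp [hc])] at hp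
      obtain ⟨hd, tl, hx⟩ := List.exists_cons_of_ne_nil (List.splitOnP_ne_nil _ rest)
      rw [hx] at hp ih
      simp only [List.modifyHead, List.mem_cons] at hp
      rcases hp with hp | hp
      · subst hp
        intro hmem
        rcases List.mem_cons.mp hmem with h1 | h1
        · exact hc h1.symm
        · exact ih hd (by simp) h1
      · exact ih p (by simp [hp])

-- termination measure fact for the recursive port of A: a recursive call happens only on a
-- hyphen-free split part of a word that does contain a hyphen
theorem count_lt_of_part (w p : List Char) (hmem : p ∈ PySem.Chars.splitOn w ['-'])
    (h : PySem.Chars.isIn ['-'] w = true) : p.count '-' < w.count '-' := by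
  rw [charsSplitOn_eq] at hmem
  have h1 : '-' ∉ p := not_dash_of_mem_splitOn w p hmem
  have h2 : '-' ∈ w := (List.singleton_infix_iff _ _).mp ((PySem.Chars.isIn_iff_infix _ _).mp h)
  rw [List.count_eq_zero.mpr h1]
  exact List.count_pos_iff.mpr h2

-- A's recursion, literally: hyphen branch = join over zip of the two full splits of the
-- recursive results; otherwise the three-way case logic. pyGetD … 0 ' ' is w[0]/m[0]; the
-- default is only reachable outside Pre_ (where Python raises IndexError).
def restoreA (m w : List Char) : List Char :=
  if h : PySem.Chars.isIn ['-'] w = true then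
    PySem.Chars.join ['-']
      (((PySem.Chars.splitOn m ['-']).zip (PySem.Chars.splitOn w ['-'])).attach.map
        (fun p => restoreA p.1.1 p.1.2))
  else if pyIsUpper w then PySem.Chars.upper m
  else if PySem.Chars.isupper (PySem.List.pyGetD w 0 ' ') then
    PySem.Chars.upperChar (PySem.List.pyGetD m 0 ' ') :: PySem.Chars.lower (PySem.List.slice m (some 1) none)
  else PySem.Chars.lower m
termination_by w.count '-'
decreasing_by
  exact count_lt_of_part w _ (List.of_mem_zip p.2).2 h

def restore_register_py (morphed_word : String) (word : String) : String :=
  String.mk (restoreA morphed_word.toList word.toList)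

-- ===== PORT B =====
-- B's helper fix(m, w): the per-segment case restoration
def fixCase (m w : List Char) : List Char :=
  if pyIsUpper w then PySem.Chars.upper m
  else if PySem.Chars.isupper (PySem.List.pyGetD w 0 ' ') then
    PySem.Chars.upperChar (PySem.List.pyGetD m 0 ' ') :: PySem.Chars.lower (PySem.List.slice m (some 1) none)
  else PySem.Chars.lower m

def restore_register_py_alt (morphed_word : String) (word : String) : String :=
  let wparts := PySem.Chars.splitOn word.toList ['-']
  let mparts := if 1 < wparts.length then PySem.Chars.splitOn morphed_word.toList ['-'] else [morphed_word.toList]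
  String.mk (PySem.Chars.join ['-'] ((mparts.zip wparts).map (fun p => fixCase p.1 p.2)))

-- ===== PRECONDITION & SPEC =====
-- a zipped (morphed-part, word-part) pair raises no exception iff the word part is nonempty and,
-- unless the part is all-uppercase or starts with a non-uppercase character, the morphed part is
-- nonempty too (else m[0] raises)
def segOK (m w : List Char) : Bool :=
  !w.isEmpty && (pyIsUpper w || !PySem.Chars.isupper (PySem.List.pyGetD w 0 ' ') || !m.isEmpty)

-- Pre_ excludes exactly the inputs on which Python's A raises IndexError: some zipped
-- (morphed, word) segment pair violates segOK (e.g. an empty word, or a trailing '-')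
def Pre_restore_register_py (morphed_word : String) (word : String) : Prop :=
  ∀ p ∈ ((if PySem.Chars.isIn ['-'] word.toList then PySem.Chars.splitOn morphed_word.toList ['-']
          else [morphed_word.toList]).zip (PySem.Chars.splitOn word.toList ['-'])),
    segOK p.1 p.2 = true
instance (morphed_word : String) (word : String) : Decidable (Pre_restore_register_py morphed_word word) := by
  unfold Pre_restore_register_py; infer_instance

def pvWitness_restore_register_py : String × String := ("ab-cd", "XY-Ef")

def Spec_restore_register_py (morphed_word : String) (word : String) (out : String) : Prop := out = restore_register_py_alt morphed_word word
instance (morphed_word : String) (word : String) (out : String) : Decidable (Spec_restore_register_py morphed_word word out) := by unfold Spec_restore_register_py; infer_instance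

-- ===== CLAIM (what is proved, stated in full; the proofs are below) =====
def Claim_equal_restore_register_py : Prop := ∀ (morphed_word : String) (word : String), Dom_restore_register_py morphed_word word → Pre_restore_register_py morphed_word word → Spec_restore_register_py morphed_word word (restore_register_py morphed_word word)

-- ===== LEMMAS AND PROOFS =====

theorem splitOn_eq_single (l : List Char) (h : '-' ∉ l) : l.splitOn '-' = [l] := by
  rw [List.splitOn]
  exact List.splitOnP_eq_single _ _
    (fun x hx => by simp only [Bool.not_eq_true, beq_eq_false_iff_ne, ne_eq]; rintro rfl; exact h hx)


theorem dash_mem_iff_one_lt (l : List Char) : '-' ∈ l ↔ 1 < (l.splitOn '-').length := by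
  constructor
  · intro h
    induction l with
    | nil => simp at h
    | cons c rest ih =>
      simp only [List.splitOn, List.splitOnP_cons] at *
      by_cases hc : c = '-'
      · rw [if_pos (by simp [hc])]
        have hne := List.splitOnP_ne_nil (fun x => x == '-') rest
        simp only [List.length_cons]
        have : 0 < (rest.splitOnP (fun x => x == '-')).length := List.length_pos_of_ne_nil hne
        omega
      · rw [if_neg (by simp [hc])]
        rcases List.mem_cons.mp h with h1 | h1
        · exact absurd h1.symm hc
        · simpa using ih h1
  · intro h
    by_contra hmem
    rw [splitOn_eq_single l hmem] at h
    simp at h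


-- on a hyphen-free word the recursion bottoms out into exactly B's helper
theorem restoreA_eq_fixCase (m w : List Char) (h : PySem.Chars.isIn ['-'] w = false) :
    restoreA m w = fixCase m w := by
  rw [restoreA, dif_neg (by simp [h]), fixCase]

theorem ports_eq (morphed_word word : String) :
    restore_register_py morphed_word word = restore_register_py_alt morphed_word word := by
  rw [restore_register_py, restore_register_py_alt]
  by_cases h : PySem.Chars.isIn ['-'] word.toList = true
  · have hl : 1 < (PySem.Chars.splitOn word.toList ['-']).length := by
      rw [charsSplitOn_eq]
      exact (dash_mem_iff_one_lt _).mp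
        ((List.singleton_infix_iff _ _).mp ((PySem.Chars.isIn_iff_infix _ _).mp h))
    rw [restoreA, dif_pos h]
    simp only [hl, if_pos]
    congr 2
    rw [List.attach_map_val (f := fun q : List Char × List Char => restoreA q.1 q.2)]
    exact List.map_congr_left (fun q hq => restoreA_eq_fixCase q.1 q.2
      (by
        have hm : '-' ∉ q.2 := by
          have := (List.of_mem_zip hq).2
          rw [charsSplitOn_eq] at this
          exact not_dash_of_mem_splitOn _ _ this
        exact (PySem.Chars.isIn_eq_false_iff _ _).mpr
          (fun hinf => hm ((List.singleton_infix_iff _ _).mp hinf))))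
  · have hfalse : PySem.Chars.isIn ['-'] word.toList = false := by
      cases hb : PySem.Chars.isIn ['-'] word.toList
      · rfl
      · exact absurd hb h
    have hmem : '-' ∉ word.toList := fun hm =>
      h ((PySem.Chars.isIn_iff_infix _ _).mpr ((List.singleton_infix_iff _ _).mpr hm))
    have hw : PySem.Chars.splitOn word.toList ['-'] = [word.toList] := by
      rw [charsSplitOn_eq]; exact splitOn_eq_single _ hmem
    rw [restoreA_eq_fixCase _ _ hfalse, hw]
    simp [PySem.Chars.join, List.intercalate]

-- ===== VERDICT (by name: the statement is the Claim_ definition above) =====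
theorem restore_register_py_spec : Claim_equal_restore_register_py := by
  intro morphed_word word _ _
  unfold Spec_restore_register_py
  exact ports_eq morphed_word word
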